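-- pv_equiv track=rewrite | github.com/Nikkuniku/AtcoderProgramming | ABC/ABC001~ABC099/ABC082/d.py | f
-- ===== SOURCE A (Python) =====
-- def f(A, p):
--     s = set([0])
--     for i in A:
--         tmp = set()
--         for j in s:
--             tmp.add(j+i)
--             tmp.add(j-i)
--         s, tmp = tmp, s
--     return p in s
-- ===== SOURCE B (Python) =====
-- def f(A, p):
--     T = sum(A)
--     if (T - p) % 2:
--         return False
--     target = (T - p) // 2
--     s = {0}
--     for i in A:
--         s |= {m + i for m in s}
--     return target in s
-- ===== Notes on version B (the rewrite author's own statement) =====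
-- stated objective: alternative
-- what changed: B reframes signed-sum reachability as subset-sum via the identity p = sum(A) - 2M: it adds a parity early-exit on (sum(A)-p) and keeps a monotonically growing set of subset sums (s |= s+i) instead of rebuilding a set of signed sums (j+i and j-i) each round.
import Mathlib
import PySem

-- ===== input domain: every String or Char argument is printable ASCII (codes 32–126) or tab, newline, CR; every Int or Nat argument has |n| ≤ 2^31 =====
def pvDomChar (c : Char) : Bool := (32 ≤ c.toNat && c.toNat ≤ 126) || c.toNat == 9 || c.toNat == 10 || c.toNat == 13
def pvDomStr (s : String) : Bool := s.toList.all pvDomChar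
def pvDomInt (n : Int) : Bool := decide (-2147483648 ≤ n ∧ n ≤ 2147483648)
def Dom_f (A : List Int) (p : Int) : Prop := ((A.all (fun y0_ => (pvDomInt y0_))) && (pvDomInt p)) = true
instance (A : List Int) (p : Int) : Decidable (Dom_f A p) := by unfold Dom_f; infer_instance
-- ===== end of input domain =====

-- B reframes signed-sum reachability as subset-sum via p = sum(A) - 2M, with a parity early-exit; alternative algorithm, similar cost.


-- ===== PORT A =====
-- for i in A: tmp = set(); for j in s: tmp.add(j+i); tmp.add(j-i); s = tmp
-- (the inner 'for j in s' only builds another set, so the result is iteration-order independent)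
def f (A : List Int) (p : Int) : Bool :=
  let s := A.foldl
    (fun s i => s.foldl (fun tmp j => PySem.Set.add (PySem.Set.add tmp (j + i)) (j - i))
      PySem.Set.empty)
    (PySem.Set.ofList [0])
  PySem.Set.contains s p

-- ===== PORT B =====
-- T = sum(A); parity guard on T - p; then subset-sum DP s |= {m+i for m in s}; target = (T-p)//2
def f_alt (A : List Int) (p : Int) : Bool :=
  let T := A.foldl (· + ·) 0
  if PySem.Int.mod (T - p) 2 ≠ 0 then false
  else
    let target := PySem.Int.floordiv (T - p) 2
    let s := A.foldl (fun s i => PySem.Set.union s (s.map (fun m => m + i)))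
      (PySem.Set.ofList [0])
    PySem.Set.contains s target

-- ===== PRECONDITION & SPEC =====
def Spec_f (A : List Int) (p : Int) (out : Bool) : Prop := out = f_alt A p
instance (A : List Int) (p : Int) (out : Bool) : Decidable (Spec_f A p out) := by unfold Spec_f; infer_instance

-- ===== CLAIM (what is proved, stated in full; the proofs are below) =====
def Claim_equal_f : Prop := ∀ (A : List Int) (p : Int), Dom_f A p → Spec_f A p (f A p)

-- ===== LEMMAS AND PROOFS =====

theorem foldl_add_shift (L : List Int) (c : Int) :
    L.foldl (· + ·) c = c + L.foldl (· + ·) 0 := by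
  induction L generalizing c with
  | nil => simp
  | cons a L ih =>
    simp only [List.foldl_cons, zero_add]
    rw [ih (c + a), ih a]; ring

-- membership after one A-round: everything of the form j+i or j-i for j in s (plus the accumulator)
theorem memA_step (s : List Int) (t : List Int) (i x : Int) :
    x ∈ s.foldl (fun tmp j => PySem.Set.add (PySem.Set.add tmp (j + i)) (j - i)) t ↔
      x ∈ t ∨ ∃ j ∈ s, x = j + i ∨ x = j - i := by
  induction s generalizing t with
  | nil => simp
  | cons a s ih =>
    simp only [List.foldl_cons, ih, PySem.Set.mem_add, List.mem_cons]
    constructor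
    · rintro (((h | h) | h) | ⟨j, hj, h⟩)
      · exact Or.inl h
      · exact Or.inr ⟨a, Or.inl rfl, Or.inl h⟩
      · exact Or.inr ⟨a, Or.inl rfl, Or.inr h⟩
      · exact Or.inr ⟨j, Or.inr hj, h⟩
    · rintro (h | ⟨j, (rfl | hj), h⟩)
      · exact Or.inl (Or.inl (Or.inl h))
      · rcases h with h | h
        · exact Or.inl (Or.inl (Or.inr h))
        · exact Or.inl (Or.inr h)
      · exact Or.inr ⟨j, hj, h⟩

-- membership after one B-round: old subset sums plus m+i
theorem memB_step (s : List Int) (i x : Int) :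
    x ∈ PySem.Set.union s (s.map (fun m => m + i)) ↔ x ∈ s ∨ ∃ m ∈ s, x = m + i := by
  simp only [PySem.Set.mem_union, List.mem_map]
  constructor
  · rintro (h | ⟨m, hm, rfl⟩)
    · exact Or.inl h
    · exact Or.inr ⟨m, hm, rfl⟩
  · rintro (h | ⟨m, hm, rfl⟩)
    · exact Or.inl h
    · exact Or.inr ⟨m, hm, rfl⟩

-- loop invariant: A's set is exactly { t + sum L - 2*m : m ∈ B's set }
theorem loop_invariant (L : List Int) (sA sB : List Int) (t : Int)
    (h : ∀ x, x ∈ sA ↔ ∃ m ∈ sB, x = t - 2 * m) :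
    ∀ x, x ∈ L.foldl
        (fun s i => s.foldl (fun tmp j => PySem.Set.add (PySem.Set.add tmp (j + i)) (j - i))
          PySem.Set.empty) sA ↔
      ∃ m ∈ L.foldl (fun s i => PySem.Set.union s (s.map (fun m => m + i))) sB,
        x = (t + L.foldl (· + ·) 0) - 2 * m := by
  induction L generalizing sA sB t with
  | nil => simpa using h
  | cons i L ih =>
    simp only [List.foldl_cons]
    have step : ∀ x,
        x ∈ sA.foldl (fun tmp j => PySem.Set.add (PySem.Set.add tmp (j + i)) (j - i))
            PySem.Set.empty ↔
          ∃ m ∈ PySem.Set.union sB (sB.map (fun m => m + i)), x = (t + i) - 2 * m := by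
      intro x
      rw [memA_step]
      simp only [PySem.Set.empty, List.not_mem_nil, false_or]
      constructor
      · rintro ⟨j, hj, hx⟩
        rcases (h j).1 hj with ⟨m, hm, rfl⟩
        rcases hx with rfl | rfl
        · exact ⟨m, (memB_step sB i m).2 (Or.inl hm), by ring⟩
        · exact ⟨m + i, (memB_step sB i (m + i)).2 (Or.inr ⟨m, hm, rfl⟩), by ring⟩
      · rintro ⟨m', hm', rfl⟩
        rcases (memB_step sB i _).1 hm' with hm | ⟨m, hm, rfl⟩
        · exact ⟨t - 2 * m', (h _).2 ⟨m', hm, rfl⟩, Or.inl (by ring)⟩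
        · exact ⟨t - 2 * m, (h _).2 ⟨m, hm, rfl⟩, Or.inr (by ring)⟩
    have := ih _ _ (t + i) step
    intro x
    rw [this x, show t + i + L.foldl (· + ·) 0 = t + (i :: L).foldl (· + ·) 0 by
      simp only [List.foldl_cons, zero_add]
      rw [foldl_add_shift L i]; ring]
    simp only [List.foldl_cons]

-- ===== VERDICT (by name: the statement is the Claim_ definition above) =====
theorem f_spec : Claim_equal_f := by
  intro A p _
  unfold Spec_f f f_alt
  simp only []
  have base : ∀ x, x ∈ PySem.Set.ofList [(0 : Int)] ↔
      ∃ m ∈ PySem.Set.ofList [(0 : Int)], x = 0 - 2 * m := by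
    intro x
    simp [PySem.Set.mem_ofList]
  have key := loop_invariant A (PySem.Set.ofList [0]) (PySem.Set.ofList [0]) 0 base p
  set T := A.foldl (· + ·) 0 with hT
  set SB := A.foldl (fun s i => PySem.Set.union s (s.map (fun m => m + i)))
      (PySem.Set.ofList [(0 : Int)]) with hSB
  rw [zero_add] at key
  by_cases hpar : PySem.Int.mod (T - p) 2 ≠ 0
  · -- parity fails: p is not of the form T - 2m, so A's membership is false too
    simp only [if_pos hpar]
    rw [PySem.Int.mod_eq_emod_of_pos (by norm_num)] at hpar
    apply Bool.eq_false_iff.2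
    intro hc
    have hp : p ∈ A.foldl
        (fun s i => s.foldl (fun tmp j => PySem.Set.add (PySem.Set.add tmp (j + i)) (j - i))
          PySem.Set.empty) (PySem.Set.ofList [0]) := (PySem.Set.contains_iff _ _).1 hc
    rcases (key).1 hp with ⟨m, _, rfl⟩
    omega
  · simp only [if_neg hpar]
    rw [not_not] at hpar
    rw [PySem.Int.mod_eq_emod_of_pos (by norm_num)] at hpar
    rw [PySem.Int.floordiv_eq_ediv_of_pos (by norm_num)]
    rcases Int.emod_emod_of_dvd (T - p) (dvd_refl 2) with _
    by_cases hmem : (T - p) / 2 ∈ SB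
    · have : p ∈ A.foldl
          (fun s i => s.foldl (fun tmp j => PySem.Set.add (PySem.Set.add tmp (j + i)) (j - i))
            PySem.Set.empty) (PySem.Set.ofList [0]) := by
        apply key.2
        exact ⟨(T - p) / 2, hmem, by omega⟩
      rw [(PySem.Set.contains_iff _ _).2 this, (PySem.Set.contains_iff _ _).2 hmem]
    · have : p ∉ A.foldl
          (fun s i => s.foldl (fun tmp j => PySem.Set.add (PySem.Set.add tmp (j + i)) (j - i))
            PySem.Set.empty) (PySem.Set.ofList [0]) := by
        intro hp
        rcases key.1 hp with ⟨m, hm, hpm⟩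
        have : (T - p) / 2 = m := by omega
        exact hmem (this ▸ hm)
      have h1 : PySem.Set.contains (A.foldl
          (fun s i => s.foldl (fun tmp j => PySem.Set.add (PySem.Set.add tmp (j + i)) (j - i))
            PySem.Set.empty) (PySem.Set.ofList [0])) p = false := by
        apply Bool.eq_false_iff.2
        intro hc
        exact this ((PySem.Set.contains_iff _ _).1 hc)
      have h2 : PySem.Set.contains SB ((T - p) / 2) = false := by
        apply Bool.eq_false_iff.2
        intro hc
        exact hmem ((PySem.Set.contains_iff _ _).1 hc)
      rw [h1, h2]
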